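-- pv_equiv track=rewrite | github.com/nielsen-oss/nebula | src/nebula/transformers/schema.py | _split_struct_fields
-- ===== SOURCE A (Python) =====
-- def _split_struct_fields(content: str) -> list[str]:
--     """Split struct field definitions, respecting nested brackets.
--
--     Example: 'a: int64, b: list[str], c: struct[{x: int}]'
--              -> ['a: int64', 'b: list[str]', 'c: struct[{x: int}]']
--     """
--     fields = []
--     current = []
--     depth = 0
--
--     for char in content:
--         if char in '[{':
--             depth += 1
--             current.append(char)
--         elif char in ']}':
--             depth -= 1
--             current.append(char)
--         elif char == ',' and depth == 0:
--             # Top-level comma - this is a field separator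
--             fields.append(''.join(current))
--             current = []
--         else:
--             current.append(char)
--
--     if current:  # last field
--         fields.append(''.join(current))
--
--     return fields
-- ===== SOURCE B (Python) =====
-- def _split_struct_fields(content: str) -> list[str]:
--     """Split struct field definitions, respecting nested brackets.
--
--     Two-pass: record the indices of top-level commas, then slice the
--     string at those positions; drop a trailing empty segment.
--     """
--     depth = 0
--     cuts = []
--     for i, ch in enumerate(content):
--         if ch in '[{':
--             depth += 1
--         elif ch in ']}':
--             depth -= 1
--         elif ch == ',' and depth == 0:
--             cuts.append(i)
--
--     segments = []
--     start = 0
--     for p in cuts: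
--         segments.append(content[start:p])
--         start = p + 1
--     segments.append(content[start:])
--
--     if segments[-1] == '':
--         segments.pop()
--     return segments
-- ===== Notes on version B (the rewrite author's own statement) =====
-- stated objective: alternative
-- what changed: A accumulates each field character-by-character in a buffer inside a single scan; B first records the indices of all top-level commas in one depth-tracking pass, then slices the string at those positions in a second pass and drops a trailing empty segment.
import Mathlib
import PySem

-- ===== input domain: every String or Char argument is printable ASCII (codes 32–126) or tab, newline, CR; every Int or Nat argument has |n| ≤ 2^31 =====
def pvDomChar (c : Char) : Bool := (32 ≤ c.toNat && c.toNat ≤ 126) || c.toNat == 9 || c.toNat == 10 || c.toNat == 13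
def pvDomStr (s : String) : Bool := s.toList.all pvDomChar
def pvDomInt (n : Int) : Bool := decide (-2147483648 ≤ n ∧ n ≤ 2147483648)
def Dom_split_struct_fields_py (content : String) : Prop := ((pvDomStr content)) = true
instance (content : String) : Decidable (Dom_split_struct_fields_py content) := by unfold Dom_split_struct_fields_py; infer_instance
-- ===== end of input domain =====

-- B replaces A's per-character buffer accumulation with a two-pass scheme (record top-level
-- comma positions, then slice the string at them); same return value (objective: alternative).

-- ===== PORT A =====
-- state = (fields, current, depth); ''.join(current) is String.mk (current is a list of chars)
def aStep (st : List String × List Char × Int) (c : Char) : List String × List Char × Int :=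
  if c = '[' ∨ c = '{' then (st.1, st.2.1 ++ [c], st.2.2 + 1)
  else if c = ']' ∨ c = '}' then (st.1, st.2.1 ++ [c], st.2.2 - 1)
  else if c = ',' ∧ st.2.2 = 0 then (st.1 ++ [String.mk st.2.1], [], st.2.2)
  else (st.1, st.2.1 ++ [c], st.2.2)

def split_struct_fields_py (content : String) : List String :=
  let st := content.toList.foldl aStep ([], [], 0)
  if st.2.1 ≠ [] then st.1 ++ [String.mk st.2.1] else st.1

-- ===== PORT B =====
-- pass 1: indices of top-level commas (i is the enumerate index, d the bracket depth)
def bCuts : List Char → Nat → Int → List Nat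
  | [], _, _ => []
  | c :: rest, i, d =>
    if c = '[' ∨ c = '{' then bCuts rest (i + 1) (d + 1)
    else if c = ']' ∨ c = '}' then bCuts rest (i + 1) (d - 1)
    else if c = ',' ∧ d = 0 then i :: bCuts rest (i + 1) d
    else bCuts rest (i + 1) d

-- pass 2: content[start:p] for each cut p, then the tail content[start:]
-- (exact for Python's slice here, where 0 ≤ start ≤ p ≤ len: xs[a:b] = (xs.drop a).take (b-a))
def bSegs (l : List Char) : List Nat → Nat → List (List Char)
  | [], start => [l.drop start]
  | p :: ps, start => (l.drop start).take (p - start) :: bSegs l ps (p + 1)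

def split_struct_fields_py_alt (content : String) : List String :=
  let l := content.toList
  let segs := (bSegs l (bCuts l 0 0) 0).map String.mk
  if segs.getLast? = some "" then segs.dropLast else segs

-- ===== PRECONDITION & SPEC =====
def Spec_split_struct_fields_py (content : String) (out : List String) : Prop := out = split_struct_fields_py_alt content
instance (content : String) (out : List String) : Decidable (Spec_split_struct_fields_py content out) := by unfold Spec_split_struct_fields_py; infer_instance

-- ===== CLAIM (what is proved, stated in full; the proofs are below) =====
def Claim_equal_split_struct_fields_py : Prop := ∀ (content : String), Dom_split_struct_fields_py content → Spec_split_struct_fields_py content (split_struct_fields_py content)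

-- ===== LEMMAS AND PROOFS =====

-- prepend a char / a chunk of chars onto the first segment
def consFirst (c : Char) : List (List Char) → List (List Char)
  | [] => [[c]]
  | s :: ss => (c :: s) :: ss

def consChunk (cur : List Char) : List (List Char) → List (List Char)
  | [] => [cur]
  | s :: ss => (cur ++ s) :: ss

-- common characterisation: split at top-level commas, keeping every (possibly empty) segment
def splitTop : List Char → Int → List (List Char)
  | [], _ => [[]]
  | c :: rest, d =>
    if c = '[' ∨ c = '{' then consFirst c (splitTop rest (d + 1))
    else if c = ']' ∨ c = '}' then consFirst c (splitTop rest (d - 1))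
    else if c = ',' ∧ d = 0 then [] :: splitTop rest d
    else consFirst c (splitTop rest d)

-- drop a trailing empty string (the shared finalisation rule)
def finS : List String → List String
  | [] => []
  | [s] => if s = "" then [] else [s]
  | s :: t :: ss => s :: finS (t :: ss)

theorem consFirst_ne_nil (c : Char) (ss : List (List Char)) : consFirst c ss ≠ [] := by
  cases ss <;> simp [consFirst]

theorem splitTop_ne_nil (l : List Char) (d : Int) : splitTop l d ≠ [] := by
  cases l with
  | nil => simp [splitTop]
  | cons c rest =>
    simp only [splitTop]
    split_ifs <;> first | exact consFirst_ne_nil _ _ | simp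

theorem consChunk_consFirst (cur : List Char) (c : Char) (ss : List (List Char)) :
    consChunk cur (consFirst c ss) = consChunk (cur ++ [c]) ss := by
  cases ss <;> simp [consChunk, consFirst]

theorem consChunk_nil (ss : List (List Char)) (h : ss ≠ []) : consChunk [] ss = ss := by
  cases ss with
  | nil => exact absurd rfl h
  | cons s ss => simp [consChunk]

theorem finS_cons_of_ne_nil (s : String) (ss : List String) (h : ss ≠ []) :
    finS (s :: ss) = s :: finS ss := by
  cases ss with
  | nil => exact absurd rfl h
  | cons t ss => simp [finS]

theorem toList_mk (cur : List Char) : (String.mk cur).toList = cur :=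
  Eq.symm (String.ofList_eq.mp rfl)

theorem mk_eq_empty_iff (cur : List Char) : String.mk cur = "" ↔ cur = [] := by
  constructor
  · intro h
    have h2 := congrArg String.toList h
    rwa [toList_mk, show ("" : String).toList = [] from rfl] at h2
  · intro h; subst h; rfl

-- A's finalisation step ("if current: fields.append(...)")
def aFin (st : List String × List Char × Int) : List String :=
  if st.2.1 ≠ [] then st.1 ++ [String.mk st.2.1] else st.1

-- A's fold, from an arbitrary state, finalised, equals the splitTop characterisation
theorem a_fold_eq (l : List Char) : ∀ (fs : List String) (cur : List Char) (d : Int),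
    aFin (l.foldl aStep (fs, cur, d))
      = fs ++ finS ((consChunk cur (splitTop l d)).map String.mk) := by
  induction l with
  | nil =>
    intro fs cur d
    simp only [List.foldl_nil, aFin, splitTop, consChunk, List.map, finS]
    by_cases h : cur = []
    · simp [h, mk_eq_empty_iff]
    · simp [h, (mk_eq_empty_iff cur).not.mpr h]
  | cons c rest ih =>
    intro fs cur d
    simp only [List.foldl_cons, aStep, splitTop]
    split_ifs with h1 h2 h3
    · rw [ih, consChunk_consFirst]
    · rw [ih, consChunk_consFirst]
    · rw [ih, consChunk_nil _ (splitTop_ne_nil rest d),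
        show consChunk cur ([] :: splitTop rest d) = cur :: splitTop rest d from by
          simp [consChunk],
        List.map_cons, finS_cons_of_ne_nil _ _ (by simp [splitTop_ne_nil])]
      simp
    · rw [ih, consChunk_consFirst]

-- pass-1 positions from offset i are the positions from offset 0, shifted by i
theorem bCuts_shift (l : List Char) : ∀ (i : Nat) (d : Int),
    bCuts l i d = (bCuts l 0 d).map (· + i) := by
  induction l with
  | nil => intro i d; simp [bCuts]
  | cons c rest ih =>
    intro i d
    simp only [bCuts]
    split_ifs <;> rw [ih (i + 1), ih 1] <;> simp [List.map_map] <;> (intros; omega)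

-- slicing shifts with the head character
theorem bSegs_shift (c : Char) (l : List Char) : ∀ (ps : List Nat) (s : Nat),
    bSegs (c :: l) (ps.map (· + 1)) (s + 1) = bSegs l ps s := by
  intro ps
  induction ps with
  | nil => intro s; simp [bSegs]
  | cons p ps ih =>
    intro s
    simp only [List.map_cons, bSegs, List.drop_succ_cons]
    rw [ih (p + 1)]
    congr 2
    omega

theorem bSegs_consFirst (c : Char) (l : List Char) (cs : List Nat) :
    bSegs (c :: l) (cs.map (· + 1)) 0 = consFirst c (bSegs l cs 0) := by
  cases cs with
  | nil => simp [bSegs, consFirst]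
  | cons p ps =>
    simp only [List.map_cons, bSegs, List.drop_zero, consFirst]
    rw [show p + 1 + 1 = (p + 1) + 1 from rfl, bSegs_shift c l ps (p + 1)]
    simp [List.take_succ_cons]

-- B's two passes compute exactly the splitTop segments
theorem b_segs_eq (l : List Char) : ∀ (d : Int),
    bSegs l (bCuts l 0 d) 0 = splitTop l d := by
  induction l with
  | nil => intro d; simp [bCuts, bSegs, splitTop]
  | cons c rest ih =>
    intro d
    simp only [bCuts, splitTop]
    split_ifs with h1 h2 h3
    · rw [bCuts_shift, bSegs_consFirst, ih]
    · rw [bCuts_shift, bSegs_consFirst, ih]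
    · rw [bCuts_shift]
      simp only [bSegs, List.drop_zero, Nat.sub_self, List.take_zero]
      rw [show (0:Nat) + 1 = 0 + 1 from rfl, bSegs_shift c rest _ 0, ih]
    · rw [bCuts_shift, bSegs_consFirst, ih]

-- B's trailing-empty rule is finS, on any nonempty segment list
theorem getLast_dropLast_eq_finS (ss : List String) (h : ss ≠ []) :
    (if ss.getLast? = some "" then ss.dropLast else ss) = finS ss := by
  induction ss with
  | nil => exact absurd rfl h
  | cons s ss ih =>
    cases ss with
    | nil => by_cases hs : s = "" <;> simp [finS, hs]
    | cons t ss =>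
      rw [finS_cons_of_ne_nil _ _ (by simp), ← ih (by simp)]
      by_cases hl : (t :: ss).getLast? = some ""
      · simp [hl]
      · simp [hl]

-- ===== VERDICT (by name: the statement is the Claim_ definition above) =====
theorem split_struct_fields_py_spec : Claim_equal_split_struct_fields_py := by
  intro content _
  show split_struct_fields_py content = split_struct_fields_py_alt content
  have hA : split_struct_fields_py content
      = aFin (content.toList.foldl aStep ([], [], 0)) := rfl
  simp only [split_struct_fields_py_alt]
  rw [hA, a_fold_eq content.toList [] [] 0, b_segs_eq content.toList 0,
    consChunk_nil _ (splitTop_ne_nil _ _), List.nil_append,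
    getLast_dropLast_eq_finS _ (by simp [List.map_eq_nil_iff, splitTop_ne_nil])]
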